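-- pv_equiv track=rewrite | github.com/sebastiaoteixeira/docs-bot | main.py | _truncate_chars
-- ===== SOURCE A (Python) =====
-- MAX_CHARS = 2500
--
-- def _truncate_chars(lines: list[str], from_line: int) -> tuple[str, bool, int, int]:
--     result_lines = []
--     total_chars = 0
--     char_truncated = False
--     for line in lines:
--         if total_chars + len(line) > MAX_CHARS:
--             char_truncated = True
--             break
--         result_lines.append(line)
--         total_chars += len(line)
--
--     end_line = from_line + len(result_lines) - 1
--     content = "".join(result_lines)
--     return content, char_truncated, from_line, end_line
-- ===== SOURCE B (Python) =====
-- MAX_CHARS = 2500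
--
-- def _truncate_chars(lines: list[str], from_line: int) -> tuple[str, bool, int, int]:
--     # prefix-sum table of line lengths, then cut at the boundary
--     sums = []
--     t = 0
--     for line in lines:
--         t += len(line)
--         sums.append(t)
--     k = sum(1 for s in sums if s <= MAX_CHARS)
--     content = "".join(lines[:k])
--     return content, k < len(lines), from_line, from_line + k - 1
-- ===== Notes on version B (the rewrite author's own statement) =====
-- stated objective: alternative
-- what changed: replaces the grow-and-break accumulator loop by a prefix-sum table over the line lengths: the cutoff index k is the count of prefix sums <= MAX_CHARS, content is ''.join(lines[:k]) and the flags/end line follow arithmetically from k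
import Mathlib
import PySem

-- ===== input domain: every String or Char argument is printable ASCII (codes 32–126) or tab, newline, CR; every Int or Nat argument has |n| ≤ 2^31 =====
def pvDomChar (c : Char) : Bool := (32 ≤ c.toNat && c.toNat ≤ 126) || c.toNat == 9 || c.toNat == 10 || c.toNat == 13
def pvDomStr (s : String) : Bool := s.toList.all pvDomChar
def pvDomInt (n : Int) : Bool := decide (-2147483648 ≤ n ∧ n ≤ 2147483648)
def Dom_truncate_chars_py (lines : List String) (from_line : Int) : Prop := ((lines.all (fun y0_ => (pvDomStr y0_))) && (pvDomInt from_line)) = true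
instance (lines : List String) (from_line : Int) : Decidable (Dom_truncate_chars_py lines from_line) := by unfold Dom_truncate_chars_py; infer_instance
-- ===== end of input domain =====

-- B replaces A's grow-and-break loop by a prefix-sum table and a cutoff count (alternative decomposition, same cost).

-- ===== PORT A =====
-- A's for-loop with break: recursion over lines carrying (result_lines, total_chars)
def pvALoop : List String → List String → Int → List String × Bool
  | [], acc, _ => (acc, false)
  | l :: rest, acc, total =>
    if total + PySem.Str.len l > 2500 then (acc, true)
    else pvALoop rest (acc ++ [l]) (total + PySem.Str.len l)

def truncate_chars_py (lines : List String) (from_line : Int) : String × Bool × Int × Int :=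
  let rb := pvALoop lines [] 0
  let end_line := from_line + (rb.1.length : Int) - 1
  (PySem.Str.join "" rb.1, rb.2, from_line, end_line)

-- ===== PORT B =====
-- prefix sums of line lengths, as in Source B's first loop
def pvSums : List String → Int → List Int
  | [], _ => []
  | l :: rest, t => (t + PySem.Str.len l) :: pvSums rest (t + PySem.Str.len l)

def truncate_chars_py_alt (lines : List String) (from_line : Int) : String × Bool × Int × Int :=
  let k := (pvSums lines 0).countP (fun s => decide (s ≤ 2500))
  (PySem.Str.join "" (lines.take k), decide (k < lines.length), from_line, from_line + (k : Int) - 1)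

-- ===== PRECONDITION & SPEC =====
def Spec_truncate_chars_py (lines : List String) (from_line : Int) (out : String × Bool × Int × Int) : Prop := out = truncate_chars_py_alt lines from_line
instance (lines : List String) (from_line : Int) (out : String × Bool × Int × Int) : Decidable (Spec_truncate_chars_py lines from_line out) := by unfold Spec_truncate_chars_py; infer_instance

-- ===== CLAIM (what is proved, stated in full; the proofs are below) =====
def Claim_equal_truncate_chars_py : Prop := ∀ (lines : List String) (from_line : Int), Dom_truncate_chars_py lines from_line → Spec_truncate_chars_py lines from_line (truncate_chars_py lines from_line)

-- ===== LEMMAS AND PROOFS =====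

-- prefix sums are bounded below by the running total (line lengths are ≥ 0)
theorem pvSums_ge (lines : List String) (t : Int) : ∀ s ∈ pvSums lines t, t ≤ s := by
  induction lines generalizing t with
  | nil => simp [pvSums]
  | cons l rest ih =>
    intro s hs
    simp only [pvSums, List.mem_cons] at hs
    have hlen : (0 : Int) ≤ PySem.Str.len l := by simp [PySem.Str.len_eq]
    rcases hs with h | h
    · omega
    · have := ih (t + PySem.Str.len l) s h
      omega

theorem pvSums_length (lines : List String) (t : Int) : (pvSums lines t).length = lines.length := by
  induction lines generalizing t with
  | nil => simp [pvSums]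
  | cons l rest ih => simp [pvSums, ih]

theorem pvALoop_eq (lines : List String) (acc : List String) (t : Int) :
    pvALoop lines acc t =
      (acc ++ lines.take ((pvSums lines t).countP (fun s => decide (s ≤ 2500))),
       decide (((pvSums lines t).countP (fun s => decide (s ≤ 2500))) < lines.length)) := by
  induction lines generalizing acc t with
  | nil => simp [pvALoop, pvSums]
  | cons l rest ih =>
    by_cases h : t + PySem.Str.len l > 2500
    · have hcount : ((pvSums (l :: rest) t).countP (fun s => decide (s ≤ 2500))) = 0 := by
        rw [List.countP_eq_zero]
        intro s hs
        simp only [pvSums, List.mem_cons] at hs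
        rcases hs with rfl | hs
        · simp only [decide_eq_true_eq]; omega
        · have := pvSums_ge rest (t + PySem.Str.len l) s hs
          simp only [decide_eq_true_eq]; omega
      simp only [pvALoop, if_pos h, hcount]
      simp
    · have hle : t + PySem.Str.len l ≤ 2500 := by omega
      have hcount : ((pvSums (l :: rest) t).countP (fun s => decide (s ≤ 2500)))
          = ((pvSums rest (t + PySem.Str.len l)).countP (fun s => decide (s ≤ 2500))) + 1 := by
        simp only [pvSums, List.countP_cons, decide_eq_true hle, if_true]
      simp only [pvALoop, if_neg h, hcount]
      rw [ih (acc ++ [l]) (t + PySem.Str.len l)]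
      refine Prod.ext ?_ ?_
      · simp [List.take_succ_cons]
      · simp

-- ===== VERDICT (by name: the statement is the Claim_ definition above) =====
theorem truncate_chars_py_spec : Claim_equal_truncate_chars_py := by
  intro lines from_line _
  unfold Spec_truncate_chars_py truncate_chars_py truncate_chars_py_alt
  rw [pvALoop_eq lines [] 0]
  have hk : ((pvSums lines 0).countP (fun s => decide (s ≤ 2500))) ≤ lines.length := by
    have h1 := List.countP_le_length (p := fun s => decide (s ≤ 2500)) (l := pvSums lines 0)
    rw [pvSums_length] at h1
    exact h1
  simp [List.length_take, Nat.min_eq_left hk]
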